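-- pv_equiv track=rewrite | github.com/junsoopablo/L1-m6A-polyA | analysis/topic_05_cellline/lncrna_control_comparison.py | parse_mm_ml_tags
-- ===== SOURCE A (Python) =====
-- def parse_mm_ml_tags(mm_tag, ml_tag):
--     result = {'m6A': [], 'psi': []}
--     if mm_tag is None or ml_tag is None:
--         return result
--     mod_blocks = mm_tag.rstrip(';').split(';')
--     ml_idx = 0
--     for block in mod_blocks:
--         if not block:
--             continue
--         parts = block.split(',')
--         mod_type = parts[0]
--         if '17802' in mod_type or 'U+p' in mod_type or 'T+p' in mod_type:
--             mod_key = 'psi'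
--         elif '21891' in mod_type or 'A+a' in mod_type or 'A+m' in mod_type:
--             mod_key = 'm6A'
--         else:
--             ml_idx += len(parts) - 1
--             continue
--         current_pos = 0
--         for pos_str in parts[1:]:
--             if pos_str:
--                 current_pos += int(pos_str)
--                 if ml_idx < len(ml_tag):
--                     result[mod_key].append((current_pos, ml_tag[ml_idx]))
--                 ml_idx += 1
--     return result
-- ===== SOURCE B (Python) =====
-- def _classify(mod_type):
--     if '17802' in mod_type or 'U+p' in mod_type or 'T+p' in mod_type:
--         return 'psi'
--     if '21891' in mod_type or 'A+a' in mod_type or 'A+m' in mod_type: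
--         return 'm6A'
--     return None
--
--
-- def parse_mm_ml_tags(mm_tag, ml_tag):
--     if mm_tag is None or ml_tag is None:
--         return {'m6A': [], 'psi': []}
--     # Phase 1: one flat list of (key, position) entries aligned with the ML array.
--     entries = []
--     for block in mm_tag.rstrip(';').split(';'):
--         if not block:
--             continue
--         parts = block.split(',')
--         key = _classify(parts[0])
--         if key is None:
--             # a skipped block consumes one ML slot per delta field (even empty ones)
--             entries.extend([(None, 0)] * (len(parts) - 1))
--         else:
--             cur = 0
--             for tok in parts[1:]:
--                 if tok:
--                     cur += int(tok)
--                     entries.append((key, cur))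
--     # Phase 2: pair entries with ML values (zip truncates) and bucket by key.
--     paired = list(zip(entries, ml_tag))
--     return {'m6A': [(pos, ml) for (k, pos), ml in paired if k == 'm6A'],
--             'psi': [(pos, ml) for (k, pos), ml in paired if k == 'psi']}
-- ===== Notes on version B (the rewrite author's own statement) =====
-- stated objective: alternative
-- what changed: Replaced A's single loop that threads a mutable result dict and a running ml_idx counter through nested block/token iteration with a two-phase pipeline: phase 1 builds one flat (key, position) entry list aligned slot-by-slot with the ML array (placeholders for skipped blocks), phase 2 zips the entries with ml_tag and buckets them by key via comprehensions.
import Mathlib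
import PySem

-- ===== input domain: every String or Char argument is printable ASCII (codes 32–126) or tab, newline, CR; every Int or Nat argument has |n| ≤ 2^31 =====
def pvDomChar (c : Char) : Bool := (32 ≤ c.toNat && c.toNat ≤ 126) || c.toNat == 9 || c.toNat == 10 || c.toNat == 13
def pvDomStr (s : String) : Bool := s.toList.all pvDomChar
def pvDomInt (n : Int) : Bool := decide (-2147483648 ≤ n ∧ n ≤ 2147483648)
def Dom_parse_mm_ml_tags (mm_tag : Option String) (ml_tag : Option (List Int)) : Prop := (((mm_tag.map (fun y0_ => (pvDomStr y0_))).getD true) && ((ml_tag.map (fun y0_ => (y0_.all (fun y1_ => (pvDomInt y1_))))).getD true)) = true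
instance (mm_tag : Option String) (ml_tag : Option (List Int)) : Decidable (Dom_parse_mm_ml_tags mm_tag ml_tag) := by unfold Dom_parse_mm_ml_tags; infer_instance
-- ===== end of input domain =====

-- B re-decomposes A's single stateful loop into two phases: build one flat entry list aligned
-- with the ML array, then bucket entries zipped with ML values by key (objective: alternative).


-- hand port of str.rstrip(';') (PySem has no right-only strip with a chars argument): exact
def pvRstripSemi (cs : List Char) : List Char := (cs.reverse.dropWhile (· == ';')).reverse

-- `'17802' in mod_type or 'U+p' in mod_type or 'T+p' in mod_type`
def pvPsiTest (mt : List Char) : Bool :=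
  PySem.Chars.isIn "17802".toList mt || PySem.Chars.isIn "U+p".toList mt || PySem.Chars.isIn "T+p".toList mt

-- `'21891' in mod_type or 'A+a' in mod_type or 'A+m' in mod_type`
def pvM6aTest (mt : List Char) : Bool :=
  PySem.Chars.isIn "21891".toList mt || PySem.Chars.isIn "A+a".toList mt || PySem.Chars.isIn "A+m".toList mt

-- ===== PORT A =====
-- the dict `result` is represented by its two fixed entries; state = (result['m6A'], result['psi'], ml_idx)
-- inner loop `for pos_str in parts[1:]`, state = (current_pos, m6A list, psi list, ml_idx)
def pvStepTokA (ml : List Int) (isPsi : Bool)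
    (st : Int × List (Int × Int) × List (Int × Int) × Nat) (tok : List Char) :
    Int × List (Int × Int) × List (Int × Int) × Nat :=
  if tok.isEmpty then st
  else
    let cur := st.1 + (PySem.Int.ofChars? tok).getD 0   -- int(pos_str); ValueError excluded by Pre_
    let app : List (Int × Int) := if st.2.2.2 < ml.length then [(cur, ml.getD st.2.2.2 0)] else []
    if isPsi then (cur, st.2.1, st.2.2.1 ++ app, st.2.2.2 + 1)
    else (cur, st.2.1 ++ app, st.2.2.1, st.2.2.2 + 1)

-- the body of `for block in mod_blocks`
def pvStepBlockA (ml : List Int)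
    (st : List (Int × Int) × List (Int × Int) × Nat) (block : List Char) :
    List (Int × Int) × List (Int × Int) × Nat :=
  if block.isEmpty then st
  else
    let parts := PySem.Chars.splitOn block [',']
    let mod_type := parts.headD []
    if pvPsiTest mod_type then
      let r := parts.tail.foldl (pvStepTokA ml true) (0, st)
      r.2
    else if pvM6aTest mod_type then
      let r := parts.tail.foldl (pvStepTokA ml false) (0, st)
      r.2
    else (st.1, st.2.1, st.2.2 + (parts.length - 1))

def parse_mm_ml_tags (mm_tag : Option String) (ml_tag : Option (List Int)) : List (String × List (Int × Int)) :=
  match mm_tag, ml_tag with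
  | some mm, some ml =>
    let mod_blocks := PySem.Chars.splitOn (pvRstripSemi mm.toList) [';']
    let st := mod_blocks.foldl (pvStepBlockA ml) ([], [], 0)
    [("m6A", st.1), ("psi", st.2.1)]
  | _, _ => [("m6A", []), ("psi", [])]

-- ===== PORT B =====
-- B's own hand port of str.rstrip(';') (exact, see pvRstripSemi)
def pvRstripSemiAlt (cs : List Char) : List Char := (cs.reverse.dropWhile (· == ';')).reverse

-- helper `_classify(mod_type)`
def pvClassify (mt : List Char) : Option String :=
  if PySem.Chars.isIn "17802".toList mt || PySem.Chars.isIn "U+p".toList mt ||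
     PySem.Chars.isIn "T+p".toList mt then some "psi"
  else if PySem.Chars.isIn "21891".toList mt || PySem.Chars.isIn "A+a".toList mt ||
          PySem.Chars.isIn "A+m".toList mt then some "m6A"
  else none

-- inner `for tok in parts[1:]`, state = (cur, entries appended so far)
def pvStepTokB (key : String) (st : Int × List (Option String × Int)) (tok : List Char) :
    Int × List (Option String × Int) :=
  if tok.isEmpty then st
  else
    let cur := st.1 + (PySem.Int.ofChars? tok).getD 0
    (cur, st.2 ++ [(some key, cur)])

-- phase-1 loop body: extend `entries` by this block's entries
def pvStepBlockB (acc : List (Option String × Int)) (block : List Char) : List (Option String × Int) :=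
  if block.isEmpty then acc
  else
    let parts := PySem.Chars.splitOn block [',']
    match pvClassify (parts.headD []) with
    | none => acc ++ List.replicate (parts.length - 1) (none, 0)
    | some key => acc ++ (parts.tail.foldl (pvStepTokB key) (0, [])).2

-- phase 2: `[(pos, ml) for (k, pos), ml in zip(entries, ml_tag) if k == key]`
def pvCollect (key : String) (entries : List (Option String × Int)) (ml : List Int) : List (Int × Int) :=
  ((entries.zip ml).filter (fun p => p.1.1 == some key)).map (fun p => (p.1.2, p.2))

def parse_mm_ml_tags_alt (mm_tag : Option String) (ml_tag : Option (List Int)) : List (String × List (Int × Int)) :=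
  match mm_tag with
  | none => [("m6A", []), ("psi", [])]
  | some mm =>
    match ml_tag with
    | none => [("m6A", []), ("psi", [])]
    | some ml =>
      let entries := (PySem.Chars.splitOn (pvRstripSemiAlt mm.toList) [';']).foldl pvStepBlockB []
      [("m6A", pvCollect "m6A" entries ml), ("psi", pvCollect "psi" entries ml)]

-- ===== PRECONDITION & SPEC =====
-- Pre_ excludes exactly the inputs where Python A raises ValueError: a psi/m6A block whose
-- non-empty delta token is not a valid int literal (int(pos_str) raises there).
def pvPreB (mm_tag : Option String) (ml_tag : Option (List Int)) : Bool :=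
  ml_tag.isNone ||
  (mm_tag.map (fun mm =>
    (PySem.Chars.splitOn ((mm.toList.reverse.dropWhile (· == ';')).reverse) [';']).all (fun block =>
      block.isEmpty ||
      !((PySem.Chars.isIn "17802".toList ((PySem.Chars.splitOn block [',']).headD []) ||
         PySem.Chars.isIn "U+p".toList ((PySem.Chars.splitOn block [',']).headD []) ||
         PySem.Chars.isIn "T+p".toList ((PySem.Chars.splitOn block [',']).headD [])) ||
        (PySem.Chars.isIn "21891".toList ((PySem.Chars.splitOn block [',']).headD []) ||
         PySem.Chars.isIn "A+a".toList ((PySem.Chars.splitOn block [',']).headD []) ||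
         PySem.Chars.isIn "A+m".toList ((PySem.Chars.splitOn block [',']).headD []))) ||
      (PySem.Chars.splitOn block [',']).tail.all
        (fun tok => tok.isEmpty || (PySem.Int.ofChars? tok).isSome)))).getD true
def Pre_parse_mm_ml_tags (mm_tag : Option String) (ml_tag : Option (List Int)) : Prop :=
  pvPreB mm_tag ml_tag = true
instance (mm_tag : Option String) (ml_tag : Option (List Int)) : Decidable (Pre_parse_mm_ml_tags mm_tag ml_tag) := by unfold Pre_parse_mm_ml_tags; infer_instance
def pvWitness_parse_mm_ml_tags : Option String × Option (List Int) := (some "A+a,1,2;U+p,0;", some [200, 150, 99])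

def Spec_parse_mm_ml_tags (mm_tag : Option String) (ml_tag : Option (List Int)) (out : List (String × List (Int × Int))) : Prop := out = parse_mm_ml_tags_alt mm_tag ml_tag
instance (mm_tag : Option String) (ml_tag : Option (List Int)) (out : List (String × List (Int × Int))) : Decidable (Spec_parse_mm_ml_tags mm_tag ml_tag out) := by unfold Spec_parse_mm_ml_tags; infer_instance

-- ===== CLAIM (what is proved, stated in full; the proofs are below) =====
def Claim_equal_parse_mm_ml_tags : Prop := ∀ (mm_tag : Option String) (ml_tag : Option (List Int)), Dom_parse_mm_ml_tags mm_tag ml_tag → Pre_parse_mm_ml_tags mm_tag ml_tag → Spec_parse_mm_ml_tags mm_tag ml_tag (parse_mm_ml_tags mm_tag ml_tag)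

-- ===== LEMMAS AND PROOFS =====

theorem pv_zip_append {α β : Type} (e1 e2 : List α) (ml : List β) :
    (e1 ++ e2).zip ml = e1.zip ml ++ e2.zip (ml.drop e1.length) := by
  induction e1 generalizing ml with
  | nil => simp
  | cons a t ih =>
    cases ml with
    | nil => simp
    | cons b bs => simp [ih]

theorem pvCollect_append (key : String) (e1 e2 : List (Option String × Int)) (ml : List Int) :
    pvCollect key (e1 ++ e2) ml = pvCollect key e1 ml ++ pvCollect key e2 (ml.drop e1.length) := by
  simp [pvCollect, pv_zip_append]

theorem pvCollect_replicate (key : String) (n : Nat) (ml : List Int) :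
    pvCollect key (List.replicate n (none, 0)) ml = [] := by
  induction n generalizing ml with
  | zero => simp [pvCollect]
  | succ k ih =>
    cases ml with
    | nil => simp [pvCollect]
    | cons y ys => simpa [pvCollect, List.replicate_succ] using ih ys

theorem pvTokB_shift (key : String) (toks : List (List Char)) (c : Int) (es : List (Option String × Int)) :
    toks.foldl (pvStepTokB key) (c, es) =
      ((toks.foldl (pvStepTokB key) (c, [])).1, es ++ (toks.foldl (pvStepTokB key) (c, [])).2) := by
  induction toks generalizing c es with
  | nil => simp
  | cons tok rest ih =>
    rw [List.foldl_cons, List.foldl_cons]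
    by_cases h : tok.isEmpty
    · rw [show pvStepTokB key (c, es) tok = (c, es) from by simp [pvStepTokB, h],
         show pvStepTokB key (c, []) tok = (c, []) from by simp [pvStepTokB, h]]
      exact ih c es
    · rw [show pvStepTokB key (c, es) tok =
            (c + (PySem.Int.ofChars? tok).getD 0,
             es ++ [(some key, c + (PySem.Int.ofChars? tok).getD 0)]) from by simp [pvStepTokB, h],
          show pvStepTokB key (c, []) tok =
            (c + (PySem.Int.ofChars? tok).getD 0,
             [(some key, c + (PySem.Int.ofChars? tok).getD 0)]) from by simp [pvStepTokB, h]]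
      rw [ih _ (es ++ _), ih _ [(some key, _)]]
      simp

theorem pv_inner_eq (ml : List Int) (isPsi : Bool) (toks : List (List Char))
    (c : Int) (m p : List (Int × Int)) (i : Nat) :
    toks.foldl (pvStepTokA ml isPsi) (c, m, p, i) =
      ((toks.foldl (pvStepTokB (if isPsi then "psi" else "m6A")) (c, [])).1,
       m ++ pvCollect "m6A" ((toks.foldl (pvStepTokB (if isPsi then "psi" else "m6A")) (c, [])).2) (ml.drop i),
       p ++ pvCollect "psi" ((toks.foldl (pvStepTokB (if isPsi then "psi" else "m6A")) (c, [])).2) (ml.drop i),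
       i + ((toks.foldl (pvStepTokB (if isPsi then "psi" else "m6A")) (c, [])).2).length) := by
  induction toks generalizing c m p i with
  | nil => simp [pvCollect]
  | cons tok rest ih =>
    by_cases h : tok.isEmpty
    · rw [List.foldl_cons, List.foldl_cons]
      rw [show pvStepTokA ml isPsi (c, m, p, i) tok = (c, m, p, i) by simp [pvStepTokA, h]]
      rw [show pvStepTokB (if isPsi then "psi" else "m6A") (c, []) tok = (c, []) by
        simp [pvStepTokB, h]]
      exact ih c m p i
    · -- facts about the head of ml.drop i
      rw [List.foldl_cons, List.foldl_cons]
      rw [show pvStepTokB (if isPsi then "psi" else "m6A") (c, []) tok =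
            (c + (PySem.Int.ofChars? tok).getD 0,
             [(some (if isPsi then "psi" else "m6A"), c + (PySem.Int.ofChars? tok).getD 0)]) by
        simp [pvStepTokB, h]]
      rw [pvTokB_shift]
      rcases hdrop : ml.drop i with _ | ⟨y, ys⟩
      · have hlen : ml.length ≤ i := by
          have := List.drop_eq_nil_iff.mp hdrop; omega
        have hlt : ¬ (i < ml.length) := by omega
        have hdrop1 : ml.drop (i + 1) = [] := List.drop_eq_nil_iff.mpr (by omega)
        rw [show pvStepTokA ml isPsi (c, m, p, i) tok =
              (c + (PySem.Int.ofChars? tok).getD 0, m, p, i + 1) by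
          cases isPsi <;> simp [pvStepTokA, h, hlt]]
        rw [ih]
        simp [pvCollect, hdrop1]
        omega
      · have hlt : i < ml.length := by
          by_contra hge
          rw [List.drop_eq_nil_iff.mpr (by omega)] at hdrop; cases hdrop
        have hy : ml.getD i 0 = y := by
          have h0 : (ml.drop i)[0]? = some y := by rw [hdrop]; rfl
          rw [List.getElem?_drop] at h0
          simp only [Nat.add_zero] at h0
          simp [List.getD_eq_getElem?_getD, h0]
        have hys : ml.drop (i + 1) = ys := by
          have h1 : ml.drop (i + 1) = (ml.drop i).drop 1 := by rw [List.drop_drop]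
          rw [h1, hdrop]; rfl
        have hyy : ml[i] = y := by
          have h2 := hy
          rw [List.getD_eq_getElem?_getD, List.getElem?_eq_getElem hlt] at h2
          simpa using h2
        cases isPsi with
        | true =>
          rw [show pvStepTokA ml true (c, m, p, i) tok =
                (c + (PySem.Int.ofChars? tok).getD 0, m,
                 p ++ [(c + (PySem.Int.ofChars? tok).getD 0, y)], i + 1) by
            simp [pvStepTokA, h, hlt, hyy]]
          rw [ih]
          simp only [if_true]
          simp [pvCollect, hys]
          omega
        | false =>
          rw [show pvStepTokA ml false (c, m, p, i) tok =
                (c + (PySem.Int.ofChars? tok).getD 0,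
                 m ++ [(c + (PySem.Int.ofChars? tok).getD 0, y)], p, i + 1) by
            simp [pvStepTokA, h, hlt, hyy]]
          rw [ih]
          simp [pvCollect, hys]
          omega

theorem pvClassify_eq (mt : List Char) :
    pvClassify mt = if pvPsiTest mt then some "psi" else if pvM6aTest mt then some "m6A" else none := rfl

theorem pvStepBlockB_shift (acc : List (Option String × Int)) (b : List Char) :
    pvStepBlockB acc b = acc ++ pvStepBlockB [] b := by
  unfold pvStepBlockB
  by_cases h : b.isEmpty
  · simp [h]
  · simp only [h, Bool.false_eq_true, if_false]
    rcases hc : pvClassify ((PySem.Chars.splitOn b [',']).headD []) with _ | key <;> simp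

theorem pvEntsB_shift (blocks : List (List Char)) (acc : List (Option String × Int)) :
    blocks.foldl pvStepBlockB acc = acc ++ blocks.foldl pvStepBlockB [] := by
  induction blocks generalizing acc with
  | nil => simp
  | cons b bs ih =>
    rw [List.foldl_cons, List.foldl_cons, pvStepBlockB_shift acc b, ih, ih (pvStepBlockB [] b)]
    simp

theorem pv_block_eq (ml : List Int) (b : List Char) (m p : List (Int × Int)) (i : Nat) :
    pvStepBlockA ml (m, p, i) b =
      (m ++ pvCollect "m6A" (pvStepBlockB [] b) (ml.drop i),
       p ++ pvCollect "psi" (pvStepBlockB [] b) (ml.drop i),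
       i + (pvStepBlockB [] b).length) := by
  unfold pvStepBlockA pvStepBlockB
  by_cases h : b.isEmpty
  · simp [h, pvCollect]
  · simp only [h, Bool.false_eq_true, if_false]
    by_cases hpsi : pvPsiTest ((PySem.Chars.splitOn b [',']).headD [])
    · simp only [hpsi, if_true, pvClassify_eq]
      rw [show ((PySem.Chars.splitOn b [',']).tail.foldl (pvStepTokA ml true) (0, m, p, i)) =
            _ from pv_inner_eq ml true _ 0 m p i]
      simp
    · by_cases hm6a : pvM6aTest ((PySem.Chars.splitOn b [',']).headD [])
      · simp only [hpsi, hm6a, if_true, Bool.false_eq_true, if_false, pvClassify_eq]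
        rw [show ((PySem.Chars.splitOn b [',']).tail.foldl (pvStepTokA ml false) (0, m, p, i)) =
              _ from pv_inner_eq ml false _ 0 m p i]
        simp
      · simp only [List.headD_eq_head?_getD] at hpsi hm6a
        simp [hpsi, hm6a, pvClassify_eq, pvCollect_replicate]

theorem pv_fold_eq (ml : List Int) (blocks : List (List Char)) (m p : List (Int × Int)) (i : Nat) :
    blocks.foldl (pvStepBlockA ml) (m, p, i) =
      (m ++ pvCollect "m6A" (blocks.foldl pvStepBlockB []) (ml.drop i),
       p ++ pvCollect "psi" (blocks.foldl pvStepBlockB []) (ml.drop i),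
       i + (blocks.foldl pvStepBlockB []).length) := by
  induction blocks generalizing m p i with
  | nil => simp [pvCollect]
  | cons b bs ih =>
    rw [List.foldl_cons, pv_block_eq, ih, List.foldl_cons, pvEntsB_shift bs (pvStepBlockB [] b)]
    have hdd : ∀ n : Nat, (ml.drop i).drop n = ml.drop (i + n) := by
      intro n; rw [List.drop_drop, Nat.add_comm]
    simp only [pvCollect_append, hdd, List.append_assoc, List.length_append, Prod.mk.injEq]
    exact ⟨trivial, trivial, by omega⟩

-- ===== VERDICT (by name: the statement is the Claim_ definition above) =====
theorem parse_mm_ml_tags_spec : Claim_equal_parse_mm_ml_tags := by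
  intro mm_tag ml_tag _ _
  unfold Spec_parse_mm_ml_tags
  match mm_tag, ml_tag with
  | none, _ => cases ml_tag <;> rfl
  | some mm, none => rfl
  | some mm, some ml =>
    show parse_mm_ml_tags (some mm) (some ml) = parse_mm_ml_tags_alt (some mm) (some ml)
    simp only [parse_mm_ml_tags, parse_mm_ml_tags_alt,
      show pvRstripSemiAlt = pvRstripSemi from rfl]
    rw [pv_fold_eq]
    simp
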